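-- pv_equiv track=rewrite | github.com/krohak/Project_Euler | LeetCode/Medium/K Character Limit/sol.py | cropSentence
-- ===== SOURCE A (Python) =====
-- def cropSentence(sentence, k):
--     if k < 1:
--         return ""
--     count = 0
--     output = []
--     res = [i for j in sentence.split() for i in (j, ' ')][:-1]
--     for word in res:
--         if count >= k:
--             return ' '.join([ w for w in output if w !=" " ])
--         count += len(word)
--         if count <= k:
--             output.append(word)
--     return ' '.join([ w for w in output if w !=" " ])
-- ===== SOURCE B (Python) =====
-- def cropSentence(sentence, k):
--     if k < 1:
--         return ""
--     kept = []
--     length = 0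
--     for word in sentence.split():
--         candidate = len(word) if not kept else length + 1 + len(word)
--         if candidate > k:
--             break
--         kept.append(word)
--         length = candidate
--     return ' '.join(kept)
-- ===== Notes on version B (the rewrite author's own statement) =====
-- stated objective: simpler
-- what changed: B drops A's interleaved word/space token list, the dual count>=k / count<=k checks and the final space-filter, iterating once over sentence.split() with explicit separator arithmetic (length + 1 + len(word)) and a single break-check per word.
import Mathlib
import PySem

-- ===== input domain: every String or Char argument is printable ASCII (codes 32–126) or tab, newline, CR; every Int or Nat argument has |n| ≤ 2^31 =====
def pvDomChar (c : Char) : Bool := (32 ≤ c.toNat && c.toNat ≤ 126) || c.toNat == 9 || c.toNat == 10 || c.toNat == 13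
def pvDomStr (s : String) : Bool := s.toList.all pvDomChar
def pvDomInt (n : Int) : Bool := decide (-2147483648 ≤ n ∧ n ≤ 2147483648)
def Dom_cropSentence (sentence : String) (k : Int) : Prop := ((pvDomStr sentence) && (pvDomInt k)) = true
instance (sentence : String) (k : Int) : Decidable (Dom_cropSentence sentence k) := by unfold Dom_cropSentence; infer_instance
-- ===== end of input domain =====

-- B replaces A's interleaved word/space token list, dual count checks and final
-- space-filter by one pass over the words with explicit separator arithmetic (simpler).

-- ===== PORT A =====
-- A's for-loop over the interleaved token list, with the early 'return' kept as a branch.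
def cropA_loop (k : Int) : List String → Int → List String → String
  | [], _, output => PySem.Str.join " " (output.filter (fun w => w != " "))
  | word :: rest, count, output =>
    if count ≥ k then PySem.Str.join " " (output.filter (fun w => w != " "))
    else
      let count' := count + PySem.Str.len word
      cropA_loop k rest count' (if count' ≤ k then output ++ [word] else output)

def cropSentence (sentence : String) (k : Int) : String :=
  if k < 1 then ""
  else
    -- res = [i for j in sentence.split() for i in (j, ' ')][:-1]
    let res := PySem.List.slice ((PySem.Str.split₀ sentence).flatMap (fun j => [j, " "])) none (some (-1))
    cropA_loop k res 0 []

-- ===== PORT B =====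
def cropB_loop (k : Int) : List String → List String → Int → List String
  | [], kept, _ => kept
  | word :: rest, kept, length =>
    let cand := if kept.isEmpty then PySem.Str.len word else length + 1 + PySem.Str.len word
    if cand > k then kept else cropB_loop k rest (kept ++ [word]) cand

def cropSentence_alt (sentence : String) (k : Int) : String :=
  if k < 1 then ""
  else PySem.Str.join " " (cropB_loop k (PySem.Str.split₀ sentence) [] 0)

-- ===== PRECONDITION & SPEC =====
def Spec_cropSentence (sentence : String) (k : Int) (out : String) : Prop := out = cropSentence_alt sentence k
instance (sentence : String) (k : Int) (out : String) : Decidable (Spec_cropSentence sentence k out) := by unfold Spec_cropSentence; infer_instance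

-- ===== CLAIM (what is proved, stated in full; the proofs are below) =====
def Claim_equal_cropSentence : Prop := ∀ (sentence : String) (k : Int), Dom_cropSentence sentence k → Spec_cropSentence sentence k (cropSentence sentence k)

-- ===== LEMMAS AND PROOFS =====

-- one-step unfoldings (zeta-reduced) of the two loops
lemma cropA_loop_cons (k : Int) (word : String) (rest : List String) (count : Int) (output : List String) :
    cropA_loop k (word :: rest) count output =
      if count ≥ k then PySem.Str.join " " (output.filter (fun w => w != " "))
      else cropA_loop k rest (count + PySem.Str.len word)
        (if count + PySem.Str.len word ≤ k then output ++ [word] else output) := by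
  rw [cropA_loop]

lemma cropB_loop_cons_nil (k : Int) (word : String) (rest : List String) (length : Int) :
    cropB_loop k (word :: rest) [] length =
      if PySem.Str.len word > k then []
      else cropB_loop k rest [word] (PySem.Str.len word) := by
  rw [cropB_loop]; simp

lemma cropB_loop_cons_ne (k : Int) (word : String) (rest kept : List String) (length : Int)
    (hkne : kept.isEmpty = false) :
    cropB_loop k (word :: rest) kept length =
      if length + 1 + PySem.Str.len word > k then kept
      else cropB_loop k rest (kept ++ [word]) (length + 1 + PySem.Str.len word) := by
  rw [cropB_loop]; simp [hkne]

-- Every token produced by str.split() is nonempty and contains no whitespace character.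
lemma split0_go_tokens (s : List Char) : ∀ (cur : List Char) (acc : List (List Char)),
    (∀ c ∈ cur, PySem.Chars.isspace c = false) →
    (∀ w ∈ acc, w ≠ [] ∧ ∀ c ∈ w, PySem.Chars.isspace c = false) →
    ∀ w ∈ PySem.Chars.split₀.go s cur acc, w ≠ [] ∧ ∀ c ∈ w, PySem.Chars.isspace c = false := by
  induction s with
  | nil =>
    intro cur acc hcur hacc w hw
    unfold PySem.Chars.split₀.go at hw
    by_cases h : cur.isEmpty
    · simp [h] at hw; exact hacc w (by simpa using hw)
    · simp [h, List.mem_reverse] at hw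
      rcases hw with h1 | h1
      · exact hacc w h1
      · subst h1
        refine ⟨by simpa [List.isEmpty_iff] using h, ?_⟩
        intro c hc; exact hcur c (by simpa using hc)
  | cons c rest ih =>
    intro cur acc hcur hacc w hw
    unfold PySem.Chars.split₀.go at hw
    by_cases hsp : PySem.Chars.isspace c
    · by_cases hce : cur.isEmpty
      · simp [hsp, hce] at hw
        exact ih [] acc (by simp) hacc w hw
      · simp [hsp, hce] at hw
        refine ih [] (cur.reverse :: acc) (by simp) ?_ w hw
        intro w' hw'
        rcases List.mem_cons.mp hw' with h1 | h1
        · subst h1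
          refine ⟨by simpa [List.isEmpty_iff] using hce, ?_⟩
          intro c' hc'; exact hcur c' (by simpa using hc')
        · exact hacc w' h1
    · simp [hsp] at hw
      refine ih (c :: cur) acc ?_ hacc w hw
      intro c' hc'
      rcases List.mem_cons.mp hc' with h1 | h1
      · subst h1; simpa using hsp
      · exact hcur c' h1

lemma split0_tokens (sentence : String) :
    ∀ w ∈ PySem.Str.split₀ sentence, (w == " ") = false ∧ PySem.Str.len w ≠ 0 := by
  intro w hw
  unfold PySem.Str.split₀ at hw
  rcases List.mem_map.mp hw with ⟨cs, hcs, rfl⟩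
  have h := split0_go_tokens sentence.toList [] [] (by simp) (by simp) cs
    (by simpa [PySem.Chars.split₀] using hcs)
  constructor
  · apply beq_false_of_ne
    intro heq
    have hsp : cs = [' '] := by
      have := congrArg String.toList heq
      simpa using this
    subst hsp
    have := h.2 ' ' (by simp)
    simp [PySem.Chars.isspace] at this
  · rw [PySem.Str.len_eq]
    simp only [String.toList_ofList]
    intro hlen
    exact h.1 (List.eq_nil_of_length_eq_zero (by exact_mod_cast hlen))

-- token list of the remaining words, as A's slice unfolds to
def toksOf (ws : List String) : List String :=
  (ws.flatMap (fun j => [j, " "])).dropLast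

lemma toksOf_cons (w : String) (rest : List String) :
    toksOf (w :: rest) = if rest.isEmpty then [w] else w :: " " :: toksOf rest := by
  cases rest with
  | nil => simp [toksOf]
  | cons r rs =>
    simp only [toksOf, List.flatMap_cons, List.isEmpty_cons, Bool.false_eq_true, if_false]
    rw [List.cons_append, List.cons_append, List.dropLast_cons_of_ne_nil, List.dropLast_cons_of_ne_nil]
    · simp
    · simp
    · simp

lemma len_one_le (w : String) (h : PySem.Str.len w ≠ 0) : 1 ≤ PySem.Str.len w := by
  rw [PySem.Str.len_eq] at h ⊢
  have : 0 ≤ (w.toList.length : Int) := by exact_mod_cast Nat.zero_le _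
  omega

lemma len_space : PySem.Str.len " " = 1 := by decide

lemma filter_single (w : String) (hw : (w == " ") = false) :
    List.filter (fun w => w != " ") [w] = [w] := by
  simp [List.filter, bne, hw]

lemma filter_keep (out kept : List String) (w : String) (hw : (w == " ") = false)
    (hfil : out.filter (fun w => w != " ") = kept) :
    (out ++ [" "] ++ [w]).filter (fun w => w != " ") = kept ++ [w] := by
  simp only [List.filter_append, hfil, filter_single w hw]
  simp [List.filter]

lemma filter_drop (out kept : List String)
    (hfil : out.filter (fun w => w != " ") = kept) :
    (out ++ [" "]).filter (fun w => w != " ") = kept := by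
  simp only [List.filter_append, hfil]
  simp [List.filter]

-- Main invariant: with at least one word already kept, A's loop over the
-- " "-prefixed remaining tokens agrees with B's loop over the remaining words.
lemma loop_agree (k : Int) : ∀ (rest out kept : List String) (length : Int),
    (∀ w ∈ rest, (w == " ") = false ∧ PySem.Str.len w ≠ 0) →
    out.filter (fun w => w != " ") = kept →
    kept ≠ [] →
    length ≤ k →
    cropA_loop k (if rest.isEmpty then [] else " " :: toksOf rest) length out
      = PySem.Str.join " " (cropB_loop k rest kept length) := by
  intro rest
  induction rest with
  | nil =>
    intro out kept length _ hfil _ _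
    simp [cropA_loop, cropB_loop, hfil]
  | cons w rest' ih =>
    intro out kept length hws hfil hkept hlen
    have hw : (w == " ") = false ∧ PySem.Str.len w ≠ 0 := hws w (by simp)
    have hlw : 1 ≤ PySem.Str.len w := len_one_le w hw.2
    have hkne : kept.isEmpty = false := by simpa [List.isEmpty_iff] using hkept
    simp only [List.isEmpty_cons, Bool.false_eq_true, if_false]
    rw [toksOf_cons, cropA_loop_cons, len_space, cropB_loop_cons_ne k w rest' kept length hkne]
    by_cases hge : length ≥ k
    · -- length = k: A returns at the space token, B's candidate overflows
      rw [if_pos hge, if_pos (show length + 1 + PySem.Str.len w > k by omega), hfil]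
    · rw [if_neg hge, if_pos (show length + 1 ≤ k by omega)]
      by_cases hfit : length + 1 + PySem.Str.len w > k
      · -- the next word overflows: A stops without keeping it, B breaks
        rw [if_pos hfit]
        by_cases hre : rest'.isEmpty
        · rw [if_pos hre, cropA_loop_cons]
          by_cases hge2 : length + 1 ≥ k
          · rw [if_pos hge2, filter_drop out kept hfil]
          · rw [if_neg hge2, if_neg (show ¬ length + 1 + PySem.Str.len w ≤ k by omega),
                cropA_loop, filter_drop out kept hfil]
        · rw [if_neg hre, cropA_loop_cons]
          by_cases hge2 : length + 1 ≥ k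
          · rw [if_pos hge2, filter_drop out kept hfil]
          · rw [if_neg hge2, if_neg (show ¬ length + 1 + PySem.Str.len w ≤ k by omega),
                cropA_loop_cons, if_pos (show length + 1 + PySem.Str.len w ≥ k by omega),
                filter_drop out kept hfil]
      · -- the next word fits: both keep it
        rw [if_neg hfit]
        by_cases hre : rest'.isEmpty
        · have hre' : rest' = [] := by simpa [List.isEmpty_iff] using hre
          rw [if_pos hre, cropA_loop_cons, if_neg (show ¬ length + 1 ≥ k by omega),
              if_pos (show length + 1 + PySem.Str.len w ≤ k by omega), cropA_loop,
              hre', cropB_loop, filter_keep out kept w hw.1 hfil]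
        · rw [if_neg hre, cropA_loop_cons, if_neg (show ¬ length + 1 ≥ k by omega),
              if_pos (show length + 1 + PySem.Str.len w ≤ k by omega)]
          have := ih (out ++ [" "] ++ [w]) (kept ++ [w]) (length + 1 + PySem.Str.len w)
            (fun x hx => hws x (by simp [hx]))
            (filter_keep out kept w hw.1 hfil) (by simp) (by omega)
          rw [if_neg hre] at this
          exact this

-- ===== VERDICT (by name: the statement is the Claim_ definition above) =====
theorem cropSentence_spec : Claim_equal_cropSentence := by
  intro sentence k _
  unfold Spec_cropSentence cropSentence cropSentence_alt
  by_cases hk : k < 1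
  · simp [hk]
  · simp only [hk, if_false]
    push_neg at hk
    rw [PySem.List.slice_to_neg_one]
    have htok := split0_tokens sentence
    rw [show ((PySem.Str.split₀ sentence).flatMap (fun j => [j, " "])).dropLast
        = toksOf (PySem.Str.split₀ sentence) from rfl]
    cases hws : PySem.Str.split₀ sentence with
    | nil => simp [toksOf, cropA_loop, cropB_loop]
    | cons w rest =>
      rw [hws] at htok
      have hw := htok w (by simp)
      have hlw : 1 ≤ PySem.Str.len w := len_one_le w hw.2
      rw [toksOf_cons, cropB_loop_cons_nil]
      by_cases hfit : PySem.Str.len w > k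
      · -- the first word already overflows: both keep nothing
        rw [if_pos hfit]
        by_cases hre : rest.isEmpty
        · rw [if_pos hre, cropA_loop_cons, if_neg (show ¬ (0 : Int) ≥ k by omega),
              if_neg (show ¬ (0 : Int) + PySem.Str.len w ≤ k by omega), cropA_loop]
          rfl
        · rw [if_neg hre, cropA_loop_cons, if_neg (show ¬ (0 : Int) ≥ k by omega),
              if_neg (show ¬ (0 : Int) + PySem.Str.len w ≤ k by omega),
              cropA_loop_cons, if_pos (show (0 : Int) + PySem.Str.len w ≥ k by omega)]
          rfl
      · -- the first word fits: both keep it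
        rw [if_neg hfit]
        by_cases hre : rest.isEmpty
        · have hre' : rest = [] := by simpa [List.isEmpty_iff] using hre
          rw [if_pos hre, cropA_loop_cons, if_neg (show ¬ (0 : Int) ≥ k by omega),
              if_pos (show (0 : Int) + PySem.Str.len w ≤ k by omega), cropA_loop,
              hre', cropB_loop]
          rw [show ([] : List String) ++ [w] = [w] from rfl, filter_single w hw.1]
        · rw [if_neg hre, cropA_loop_cons, if_neg (show ¬ (0 : Int) ≥ k by omega),
              if_pos (show (0 : Int) + PySem.Str.len w ≤ k by omega),
              show (0 : Int) + PySem.Str.len w = PySem.Str.len w by ring]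
          have := loop_agree k rest ([] ++ [w]) [w] (PySem.Str.len w)
            (fun x hx => htok x (by simp [hx]))
            (by rw [show ([] : List String) ++ [w] = [w] from rfl, filter_single w hw.1])
            (by simp) (by omega)
          rw [if_neg hre] at this
          exact this
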